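-- pv_equiv track=rewrite | github.com/takezou621/repairgpt | src/services/repair_guide_service.py | _is_similar_difficulty
-- ===== SOURCE A (Python) =====
-- def _is_similar_difficulty(guide_difficulty: str, target_difficulty: str) -> bool:
--     """
--     Check if two difficulty levels are similar.
--
--     Args:
--         guide_difficulty: Guide's difficulty level
--         target_difficulty: Target difficulty level
--
--     Returns:
--         True if difficulty levels are similar
--     """
--     # Define difficulty similarity groups
--     difficulty_groups = [
--         ["easy", "beginner"],
--         ["moderate", "intermediate"],
--         ["difficult", "expert", "very difficult"],
--     ]
--
--     guide_lower = guide_difficulty.lower()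
--     target_lower = target_difficulty.lower()
--
--     # Check if both difficulties are in the same group
--     for group in difficulty_groups:
--         if guide_lower in group and target_lower in group:
--             return True
--
--     return False
-- ===== SOURCE B (Python) =====
-- _DIFFICULTY_GROUPS = [
--     ["easy", "beginner"],
--     ["moderate", "intermediate"],
--     ["difficult", "expert", "very difficult"],
-- ]
--
-- _GROUP_ID = {
--     name: idx
--     for idx, group in enumerate(_DIFFICULTY_GROUPS)
--     for name in group
-- }
--
--
-- def _is_similar_difficulty(guide_difficulty: str, target_difficulty: str) -> bool:
--     guide_id = _GROUP_ID.get(guide_difficulty.lower())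
--     if guide_id is None:
--         return False
--     return guide_id == _GROUP_ID.get(target_difficulty.lower())
-- ===== Notes on version B (the rewrite author's own statement) =====
-- stated objective: idiomatic
-- what changed: Replaced the per-call loop over similarity groups with a precomputed name-to-group-id dictionary built once at module level; the function becomes two O(1) lookups with an explicit not-found guard.
import Mathlib
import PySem

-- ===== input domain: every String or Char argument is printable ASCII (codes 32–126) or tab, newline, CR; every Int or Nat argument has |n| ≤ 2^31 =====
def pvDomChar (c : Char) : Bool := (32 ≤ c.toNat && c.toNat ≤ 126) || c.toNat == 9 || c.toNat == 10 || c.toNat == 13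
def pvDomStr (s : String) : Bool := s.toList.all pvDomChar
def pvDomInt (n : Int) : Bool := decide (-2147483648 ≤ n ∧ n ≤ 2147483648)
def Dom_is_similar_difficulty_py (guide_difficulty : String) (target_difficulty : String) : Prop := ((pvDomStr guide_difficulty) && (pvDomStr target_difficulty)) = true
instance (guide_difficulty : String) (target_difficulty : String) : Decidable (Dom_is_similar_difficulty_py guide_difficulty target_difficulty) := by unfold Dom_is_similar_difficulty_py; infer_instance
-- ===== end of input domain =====

-- B replaces A's per-call scan over similarity groups with a dictionary mapping each
-- difficulty name to its group id, built once; the function is two lookups with a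
-- not-found guard (objective: idiomatic).

-- ===== PORT A =====
-- the for-loop over difficulty_groups: first group containing both lowered strings → True
def pvSimLoop (groups : List (List String)) (gl tl : String) : Bool :=
  match groups with
  | [] => false
  | g :: rest => if g.contains gl && g.contains tl then true else pvSimLoop rest gl tl

def is_similar_difficulty_py (guide_difficulty : String) (target_difficulty : String) : Bool :=
  let difficulty_groups : List (List String) :=
    [["easy", "beginner"], ["moderate", "intermediate"],
     ["difficult", "expert", "very difficult"]]
  let guide_lower := PySem.Str.lower guide_difficulty
  let target_lower := PySem.Str.lower target_difficulty
  pvSimLoop difficulty_groups guide_lower target_lower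

-- ===== PORT B =====
def pvDifficultyGroups : List (List String) :=
  [["easy", "beginner"], ["moderate", "intermediate"],
   ["difficult", "expert", "very difficult"]]

-- {name: idx for idx, group in enumerate(_DIFFICULTY_GROUPS) for name in group}
def pvGroupId : PySem.Dict String Int :=
  (PySem.List.enumerate pvDifficultyGroups 0).foldl
    (fun d p => p.2.foldl (fun d name => d.insert name p.1) d)
    PySem.Dict.empty

def is_similar_difficulty_py_alt (guide_difficulty : String) (target_difficulty : String) : Bool :=
  match pvGroupId.get? (PySem.Str.lower guide_difficulty) with
  | none => false
  | some i => pvGroupId.get? (PySem.Str.lower target_difficulty) == some i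

-- ===== PRECONDITION & SPEC =====
def Spec_is_similar_difficulty_py (guide_difficulty : String) (target_difficulty : String) (out : Bool) : Prop := out = is_similar_difficulty_py_alt guide_difficulty target_difficulty
instance (guide_difficulty : String) (target_difficulty : String) (out : Bool) : Decidable (Spec_is_similar_difficulty_py guide_difficulty target_difficulty out) := by unfold Spec_is_similar_difficulty_py; infer_instance

-- ===== CLAIM (what is proved, stated in full; the proofs are below) =====
def Claim_equal_is_similar_difficulty_py : Prop := ∀ (guide_difficulty : String) (target_difficulty : String), Dom_is_similar_difficulty_py guide_difficulty target_difficulty → Spec_is_similar_difficulty_py guide_difficulty target_difficulty (is_similar_difficulty_py guide_difficulty target_difficulty)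

-- ===== LEMMAS AND PROOFS =====

theorem pvGroupId_eq : pvGroupId = PySem.Dict.mk
    [("easy", 0), ("beginner", 0), ("moderate", 1), ("intermediate", 1),
     ("difficult", 2), ("expert", 2), ("very difficult", 2)] := by
  decide

theorem pvGet (s : String) :
    (PySem.Dict.mk [("easy", (0:Int)), ("beginner", 0), ("moderate", 1), ("intermediate", 1),
      ("difficult", 2), ("expert", 2), ("very difficult", 2)]).get? s =
    (if s = "easy" then some 0 else if s = "beginner" then some 0
     else if s = "moderate" then some 1 else if s = "intermediate" then some 1
     else if s = "difficult" then some 2 else if s = "expert" then some 2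
     else if s = "very difficult" then some 2 else none) := by
  by_cases h1 : s = "easy"
  · subst h1; decide
  by_cases h2 : s = "beginner"
  · subst h2; decide
  by_cases h3 : s = "moderate"
  · subst h3; decide
  by_cases h4 : s = "intermediate"
  · subst h4; decide
  by_cases h5 : s = "difficult"
  · subst h5; decide
  by_cases h6 : s = "expert"
  · subst h6; decide
  by_cases h7 : s = "very difficult"
  · subst h7; decide
  have e1 : ("easy" == s) = false := beq_eq_false_iff_ne.mpr (fun e => h1 e.symm)
  have e2 : ("beginner" == s) = false := beq_eq_false_iff_ne.mpr (fun e => h2 e.symm)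
  have e3 : ("moderate" == s) = false := beq_eq_false_iff_ne.mpr (fun e => h3 e.symm)
  have e4 : ("intermediate" == s) = false := beq_eq_false_iff_ne.mpr (fun e => h4 e.symm)
  have e5 : ("difficult" == s) = false := beq_eq_false_iff_ne.mpr (fun e => h5 e.symm)
  have e6 : ("expert" == s) = false := beq_eq_false_iff_ne.mpr (fun e => h6 e.symm)
  have e7 : ("very difficult" == s) = false := beq_eq_false_iff_ne.mpr (fun e => h7 e.symm)
  simp only [PySem.Dict.get?, List.find?_cons, List.find?_nil, e1, e2, e3, e4, e5, e6, e7]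
  simp [h1, h2, h3, h4, h5, h6, h7]

theorem pvKey (gl tl : String) :
    pvSimLoop [["easy", "beginner"], ["moderate", "intermediate"],
      ["difficult", "expert", "very difficult"]] gl tl =
    (match pvGroupId.get? gl with
     | none => false
     | some i => pvGroupId.get? tl == some i) := by
  rw [pvGroupId_eq]
  simp only [pvGet]
  split <;> rename_i hm <;> split_ifs at hm <;>
    simp_all only [Option.some.injEq] <;> subst_vars <;>
    simp only [pvSimLoop, List.contains_cons, List.contains_nil] <;>
    by_cases t1 : tl = "easy" <;> by_cases t2 : tl = "beginner" <;>
    by_cases t3 : tl = "moderate" <;> by_cases t4 : tl = "intermediate" <;>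
    by_cases t5 : tl = "difficult" <;> by_cases t6 : tl = "expert" <;>
    by_cases t7 : tl = "very difficult" <;> simp_all

-- ===== VERDICT (by name: the statement is the Claim_ definition above) =====
theorem is_similar_difficulty_py_spec : Claim_equal_is_similar_difficulty_py := by
  intro g t _
  unfold Spec_is_similar_difficulty_py is_similar_difficulty_py is_similar_difficulty_py_alt
  exact pvKey (PySem.Str.lower g) (PySem.Str.lower t)
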